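-- pv_equiv track=rewrite | github.com/MeetKai/functionary | functionary/train/train_lora.py | extract_unmasked_chunks
-- ===== SOURCE A (Python) =====
-- from typing import Dict, Optional, List
--
-- def extract_unmasked_chunks(labels: List[int], masked_value) -> List[List[int]]:
--     """This function is used to extract unmasked chunks of integer
--     For example, labels = [-100, -100, 1, 2, 3, -100, -100, 4, 5] --> chunks = [[1,2,3], [4,5]]
--     Args:
--         labels (List[int]): list of integer containing token_id and -100
--
--     Returns:
--         List[List[int]]: list of chunk, for example: [[1,2,3], [4,5]]
--     """
--     chunks = []
--     chunk = []
--     for token_id in labels: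
--         if token_id != masked_value:
--             chunk.append(token_id)
--         else:
--             if len(chunk) > 0:
--                 chunks.append(chunk)
--                 chunk = []
--     if len(chunk) > 0:
--         chunks.append(chunk)
--     return chunks
-- ===== SOURCE B (Python) =====
-- from itertools import groupby
-- from typing import List
--
--
-- def extract_unmasked_chunks(labels: List[int], masked_value) -> List[List[int]]:
--     return [list(g) for k, g in groupby(labels, key=lambda t: t != masked_value) if k]
-- ===== Notes on version B (the rewrite author's own statement) =====
-- stated objective: idiomatic
-- what changed: Replaced the explicit chunk buffer with trailing-flush branch by a run-grouping traversal (itertools.groupby on the mask predicate), keeping only the unmasked runs.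
import Mathlib
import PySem

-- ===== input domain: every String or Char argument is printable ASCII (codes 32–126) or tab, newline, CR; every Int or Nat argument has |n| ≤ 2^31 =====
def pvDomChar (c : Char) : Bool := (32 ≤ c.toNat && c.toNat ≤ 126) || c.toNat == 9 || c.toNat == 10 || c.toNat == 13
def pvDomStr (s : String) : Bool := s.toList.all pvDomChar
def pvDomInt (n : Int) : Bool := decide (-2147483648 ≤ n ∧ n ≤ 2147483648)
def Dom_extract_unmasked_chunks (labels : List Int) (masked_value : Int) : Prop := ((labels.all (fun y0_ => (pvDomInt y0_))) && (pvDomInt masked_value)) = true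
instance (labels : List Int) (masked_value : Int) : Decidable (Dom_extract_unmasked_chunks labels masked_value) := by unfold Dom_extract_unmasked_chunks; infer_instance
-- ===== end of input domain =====

-- B replaces A's per-element buffer-and-flush loop by a run-grouping traversal
-- (itertools.groupby on the mask predicate), keeping the unmasked runs; idiomatic, same cost.


-- ===== PORT A =====
-- literal port of A: fold over labels with state (chunks, chunk); trailing flush
def extract_unmasked_chunks (labels : List Int) (masked_value : Int) : List (List Int) :=
  let s := labels.foldl
    (fun (st : List (List Int) × List Int) token_id =>
      if token_id ≠ masked_value then (st.1, st.2 ++ [token_id])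
      else if st.2.length > 0 then (st.1 ++ [st.2], [])
      else st)
    ([], [])
  if s.2.length > 0 then s.1 ++ [s.2] else s.1

-- ===== PORT B =====
-- groupby(labels, key = t != masked_value): consecutive runs of equal key; keep the True runs
def altRuns (masked_value : Int) : List Int → List (List Int)
  | [] => []
  | x :: xs =>
    if x = masked_value then altRuns masked_value xs
    else (x :: xs.takeWhile (· ≠ masked_value)) ::
         altRuns masked_value (xs.dropWhile (· ≠ masked_value))
termination_by ls => ls.length
decreasing_by
  · simp
  · simpa using Nat.lt_succ_of_le (List.length_dropWhile_le (p := (· ≠ masked_value)) (l := xs))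

def extract_unmasked_chunks_alt (labels : List Int) (masked_value : Int) : List (List Int) :=
  altRuns masked_value labels

-- ===== PRECONDITION & SPEC =====
def Spec_extract_unmasked_chunks (labels : List Int) (masked_value : Int) (out : List (List Int)) : Prop := out = extract_unmasked_chunks_alt labels masked_value
instance (labels : List Int) (masked_value : Int) (out : List (List Int)) : Decidable (Spec_extract_unmasked_chunks labels masked_value out) := by unfold Spec_extract_unmasked_chunks; infer_instance

-- ===== CLAIM (what is proved, stated in full; the proofs are below) =====
def Claim_equal_extract_unmasked_chunks : Prop := ∀ (labels : List Int) (masked_value : Int), Dom_extract_unmasked_chunks labels masked_value → Spec_extract_unmasked_chunks labels masked_value (extract_unmasked_chunks labels masked_value)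

-- ===== LEMMAS AND PROOFS =====

-- A's loop body and trailing flush, named so the invariant proof can talk about them
def aStep (m : Int) (st : List (List Int) × List Int) (t : Int) : List (List Int) × List Int :=
  if t ≠ m then (st.1, st.2 ++ [t])
  else if st.2.length > 0 then (st.1 ++ [st.2], [])
  else st

def aFlush (s : List (List Int) × List Int) : List (List Int) :=
  if s.2.length > 0 then s.1 ++ [s.2] else s.1

theorem A_as_step (labels : List Int) (m : Int) :
    extract_unmasked_chunks labels m = aFlush (labels.foldl (aStep m) ([], [])) := rfl

-- one unfolding step of altRuns in takeWhile/dropWhile form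
theorem altRuns_step (m : Int) (ls : List Int) :
    altRuns m ls =
      (if ls.takeWhile (· ≠ m) = [] then [] else [ls.takeWhile (· ≠ m)]) ++
        altRuns m (ls.dropWhile (· ≠ m)) := by
  cases ls with
  | nil => simp [altRuns]
  | cons x xs =>
    by_cases hx : x = m
    · simp [altRuns, hx]
    · simp [altRuns, hx]

-- loop invariant: flushing A's fold from state (chunks, chunk) yields chunks, then the
-- first unmasked run extended by chunk, then B's runs of the remainder
theorem fold_invariant (m : Int) (ls : List Int) :
    ∀ (chunks : List (List Int)) (chunk : List Int),
      aFlush (ls.foldl (aStep m) (chunks, chunk)) =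
        chunks ++
          ((if chunk ++ ls.takeWhile (· ≠ m) = [] then []
            else [chunk ++ ls.takeWhile (· ≠ m)]) ++
           altRuns m (ls.dropWhile (· ≠ m))) := by
  induction ls with
  | nil =>
    intro chunks chunk
    by_cases h : chunk = [] <;>
      simp [h, aFlush, altRuns, List.length_pos_iff]
  | cons x xs ih =>
    intro chunks chunk
    rw [List.foldl_cons]
    by_cases hx : x = m
    · by_cases hc : chunk = []
      · rw [show aStep m (chunks, chunk) x = (chunks, chunk) from by simp [aStep, hx, hc]]
        rw [ih chunks chunk, hc]
        simp only [List.nil_append]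
        rw [← altRuns_step]
        simp [hx, altRuns]
      · rw [show aStep m (chunks, chunk) x = (chunks ++ [chunk], []) from by
            simp [aStep, hx, List.length_pos_iff, hc]]
        rw [ih (chunks ++ [chunk]) []]
        simp only [List.nil_append]
        rw [← altRuns_step]
        simp [hx, hc, altRuns]
    · rw [show aStep m (chunks, chunk) x = (chunks, chunk ++ [x]) from by simp [aStep, hx]]
      rw [ih chunks (chunk ++ [x])]
      simp [hx]

-- ===== VERDICT (by name: the statement is the Claim_ definition above) =====
theorem extract_unmasked_chunks_spec : Claim_equal_extract_unmasked_chunks := by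
  intro labels m _
  show extract_unmasked_chunks labels m = extract_unmasked_chunks_alt labels m
  rw [A_as_step, fold_invariant m labels [] []]
  simp only [List.nil_append]
  rw [← altRuns_step]
  rfl
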